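-- pv_equiv track=rewrite | github.com/kn7072/algorithms | algorithms_compression/burrows_wheeler/bw.py | rank_bwt
-- ===== SOURCE A (Python) =====
-- def rank_bwt(bw: str) -> tuple[list, dict]:
--     """Given BWT string bw, returns a parallel list of B-ranks.
--
--     Also returns tots, a mapping from characters to # times the
--     character appears in BWT.
--     """
--     tots = dict()
--     ranks = []
--     for char_i in bw:
--         if char_i not in tots:
--             tots[char_i] = 0
--         ranks.append(tots[char_i])
--         tots[char_i] += 1
--     return ranks, tots
-- ===== SOURCE B (Python) =====
-- def rank_bwt(bw: str) -> tuple[list, dict]: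
--     """Given BWT string bw, returns a parallel list of B-ranks.
--
--     Also returns tots, a mapping from characters to # times the
--     character appears in BWT.
--     """
--     positions = {}
--     for i, c in enumerate(bw):
--         positions.setdefault(c, []).append(i)
--     ranks = [0] * len(bw)
--     tots = {}
--     for c, idxs in positions.items():
--         tots[c] = len(idxs)
--         for rank, idx in enumerate(idxs):
--             ranks[idx] = rank
--     return ranks, tots
-- ===== Notes on version B (the rewrite author's own statement) =====
-- stated objective: alternative
-- what changed: A's single pass with a running per-character counter is replaced by a group-then-scatter decomposition: one pass groups each character's occurrence indices into a positions dict, then a second pass writes ranks[idx] = k for the k-th index of each character and sets tots[c] = len(idxs).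
import Mathlib
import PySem

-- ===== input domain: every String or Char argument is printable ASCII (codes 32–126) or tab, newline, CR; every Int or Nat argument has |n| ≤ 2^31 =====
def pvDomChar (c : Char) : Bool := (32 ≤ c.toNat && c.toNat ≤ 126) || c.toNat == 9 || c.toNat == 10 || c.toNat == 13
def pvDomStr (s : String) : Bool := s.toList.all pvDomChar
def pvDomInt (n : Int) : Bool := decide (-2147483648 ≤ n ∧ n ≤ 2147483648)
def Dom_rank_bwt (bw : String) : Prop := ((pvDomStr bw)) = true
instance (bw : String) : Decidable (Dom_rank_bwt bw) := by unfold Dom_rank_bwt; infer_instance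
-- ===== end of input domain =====

-- B replaces A's single running-counter pass by a group-then-scatter decomposition: one pass
-- groups the occurrence indices of each character, a second pass writes each rank by position
-- (objective: alternative decomposition, same O(n) cost).

-- ===== PORT A =====
-- A: one pass with a running counter dict; ranks appended, tots returned as the counter.
def rank_bwt (bw : String) : List Int × (List (String × Int)) :=
  let st := bw.toList.foldl
    (fun (st : PySem.Dict String Int × List Int) c =>
      let s := String.ofList [c]            -- iterating a Python str yields 1-char strings
      let tots := if st.1.contains s then st.1 else st.1.insert s 0
      (tots.insert s (tots.getD s 0 + 1), st.2 ++ [tots.getD s 0]))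
    (PySem.Dict.empty, [])
  (st.2, st.1.items)

-- ===== PORT B =====
-- B: group indices per character (positions.setdefault(c, []).append(i) = Dict.modify with append),
-- then scatter: ranks[idx] = rank for the rank-th index of each character; tots[c] = len(idxs).
def rank_bwt_alt (bw : String) : List Int × (List (String × Int)) :=
  let positions := (PySem.List.enumerate bw.toList).foldl
    (fun (d : PySem.Dict String (List Int)) p =>
      d.modify (String.ofList [p.2]) [] (· ++ [p.1])) PySem.Dict.empty
  let st := positions.items.foldl
    (fun (st : PySem.Dict String Int × List Int) ci =>
      (st.1.insert ci.1 (PySem.List.len ci.2),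
       (PySem.List.enumerate ci.2).foldl (fun r q => PySem.List.pySetD r q.2 q.1) st.2))
    (PySem.Dict.empty, List.replicate bw.toList.length (0 : Int))   -- [0] * len(bw)
  (st.2, st.1.items)

-- ===== PRECONDITION & SPEC =====
def Spec_rank_bwt (bw : String) (out : List Int × (List (String × Int))) : Prop := out = rank_bwt_alt bw
instance (bw : String) (out : List Int × (List (String × Int))) : Decidable (Spec_rank_bwt bw out) := by unfold Spec_rank_bwt; infer_instance

-- ===== CLAIM (what is proved, stated in full; the proofs are below) =====
def Claim_equal_rank_bwt : Prop := ∀ (bw : String), Dom_rank_bwt bw → Spec_rank_bwt bw (rank_bwt bw)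

-- ===== LEMMAS AND PROOFS =====

-- The B-rank list of l relative to an already-seen prefix p.
def specR (p l : List String) : List Int :=
  match l with
  | [] => []
  | s :: t => (p.count s : Int) :: specR (p ++ [s]) t

-- Occurrence indices of s in l, offset by i0 (what B's `positions` stores per key).
def posList (i0 : Int) (l : List String) (s : String) : List Int :=
  match l with
  | [] => []
  | a :: t => if a = s then i0 :: posList (i0 + 1) t s else posList (i0 + 1) t s

lemma length_specR (p l : List String) : (specR p l).length = l.length := by
  induction l generalizing p with
  | nil => rfl
  | cons a t ih => simp [specR, ih]

lemma getElem?_specR (p l : List String) (j : Nat) (hj : j < l.length) :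
    (specR p l)[j]? = some (((p ++ l.take j).count l[j] : Int)) := by
  induction l generalizing p j with
  | nil => simp at hj
  | cons a t ih =>
    cases j with
    | zero => simp [specR]
    | succ j =>
      simp only [specR, List.getElem?_cons_succ, List.take_succ_cons, List.getElem_cons_succ]
      rw [ih (p ++ [a]) j (by simpa using hj)]
      simp

lemma stepA_dict (d : PySem.Dict String Int) (s : String) :
    (if d.contains s then d else d.insert s 0).insert s
      ((if d.contains s then d else d.insert s 0).getD s 0 + 1)
    = d.insert s (d.getD s 0 + 1) := by
  by_cases h : d.contains s
  · simp [h]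
  · rw [if_neg h, PySem.Dict.getD_insert_self, PySem.Dict.insert_insert_self,
        PySem.Dict.getD_of_not_contains _ _ (eq_false_of_ne_true h)]

lemma counter_snoc (p : List String) (s : String) :
    PySem.Dict.counter (p ++ [s])
      = (PySem.Dict.counter p).insert s ((PySem.Dict.counter p).getD s 0 + 1) := by
  rw [← PySem.Dict.foldl_insert_getD_add_one_eq_counter,
      ← PySem.Dict.foldl_insert_getD_add_one_eq_counter, List.foldl_append]
  simp

lemma A_fold (l : List Char) (p : List String) (r : List Int) :
    l.foldl
      (fun (st : PySem.Dict String Int × List Int) c =>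
        let s := String.ofList [c]
        let tots := if st.1.contains s then st.1 else st.1.insert s 0
        (tots.insert s (tots.getD s 0 + 1), st.2 ++ [tots.getD s 0]))
      (PySem.Dict.counter p, r)
    = (PySem.Dict.counter (p ++ l.map (fun c => String.ofList [c])),
       r ++ specR p (l.map (fun c => String.ofList [c]))) := by
  induction l generalizing p r with
  | nil => simp [specR]
  | cons c t ih =>
    have hval : (if (PySem.Dict.counter p).contains (String.ofList [c]) then PySem.Dict.counter p
        else (PySem.Dict.counter p).insert (String.ofList [c]) 0).getD (String.ofList [c]) 0
        = (p.count (String.ofList [c]) : Int) := by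
      by_cases h : (PySem.Dict.counter p).contains (String.ofList [c])
      · simp [h, PySem.Dict.getD_counter]
      · have hs : String.ofList [c] ∉ p := by simpa [PySem.Dict.contains_counter] using h
        rw [if_neg h, PySem.Dict.getD_insert_self]
        simp [List.count_eq_zero_of_not_mem hs]
    have hstep :
        (let s := String.ofList [c]
         let tots := if (PySem.Dict.counter p, r).1.contains s
            then (PySem.Dict.counter p, r).1 else (PySem.Dict.counter p, r).1.insert s 0
         (tots.insert s (tots.getD s 0 + 1), (PySem.Dict.counter p, r).2 ++ [tots.getD s 0]))
        = (PySem.Dict.counter (p ++ [String.ofList [c]]),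
           r ++ [(p.count (String.ofList [c]) : Int)]) := by
      show ((if (PySem.Dict.counter p).contains (String.ofList [c]) then PySem.Dict.counter p
              else (PySem.Dict.counter p).insert (String.ofList [c]) 0).insert (String.ofList [c])
            ((if (PySem.Dict.counter p).contains (String.ofList [c]) then PySem.Dict.counter p
              else (PySem.Dict.counter p).insert (String.ofList [c]) 0).getD (String.ofList [c]) 0 + 1),
           r ++ [(if (PySem.Dict.counter p).contains (String.ofList [c]) then PySem.Dict.counter p
              else (PySem.Dict.counter p).insert (String.ofList [c]) 0).getD (String.ofList [c]) 0]) = _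
      rw [stepA_dict, hval, ← counter_snoc]
    rw [List.foldl_cons, hstep, ih (p ++ [String.ofList [c]])
          (r ++ [(p.count (String.ofList [c]) : Int)])]
    simp [specR]

lemma rank_bwt_eq (bw : String) :
    rank_bwt bw = (specR [] (bw.toList.map (fun c => String.ofList [c])),
                   (PySem.Dict.counter (bw.toList.map (fun c => String.ofList [c]))).items) := by
  unfold rank_bwt
  rw [show (PySem.Dict.empty : PySem.Dict String Int) = PySem.Dict.counter [] from rfl,
      A_fold bw.toList [] []]
  simp

-- ----- B side -----

lemma posList_eq_filter (cs : List Char) (i0 : Int) (s : String) :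
    (((PySem.List.enumerate cs i0).map (fun p => (String.ofList [p.2], p.1))).filter
        (fun q => q.1 == s)).map (·.2)
      = posList i0 (cs.map (fun c => String.ofList [c])) s := by
  induction cs generalizing i0 with
  | nil => simp [posList, PySem.List.enumerate_nil]
  | cons a t ih =>
    rw [PySem.List.enumerate_cons]
    by_cases h : String.ofList [a] = s
    · simp [posList, h, ih]
    · simp [posList, h, ih]

lemma length_posList (i0 : Int) (l : List String) (s : String) :
    (posList i0 l s).length = l.count s := by
  induction l generalizing i0 with
  | nil => simp [posList]
  | cons a t ih =>
    by_cases h : a = s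
    · simp [posList, h, ih]
    · simp [posList, h, ih]

lemma mem_posList (i0 x : Int) (l : List String) (s : String) :
    x ∈ posList i0 l s ↔ ∃ m : Nat, ∃ _ : m < l.length, x = i0 + m ∧ l[m] = s := by
  induction l generalizing i0 with
  | nil => simp [posList]
  | cons a t ih =>
    by_cases h : a = s
    · simp only [posList, h, if_true, List.mem_cons, ih]
      constructor
      · rintro (rfl | ⟨m, hm, rfl, hs⟩)
        · exact ⟨0, by simp, by simp, by simp⟩
        · exact ⟨m + 1, by simp only [List.length_cons]; omega, by push_cast; ring, by simpa using hs⟩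
      · rintro ⟨m, hm, rfl, hs⟩
        cases m with
        | zero => left; simp
        | succ m => right; exact ⟨m, by simp only [List.length_cons] at hm; omega, by push_cast; ring, by simpa using hs⟩
    · simp only [posList, h, if_false, ih]
      constructor
      · rintro ⟨m, hm, rfl, hs⟩
        exact ⟨m + 1, by simp only [List.length_cons]; omega, by push_cast; ring, by simpa using hs⟩
      · rintro ⟨m, hm, rfl, hs⟩
        cases m with
        | zero => simp at hs; exact absurd hs h
        | succ m => exact ⟨m, by simp only [List.length_cons] at hm; omega, by push_cast; ring, by simpa using hs⟩

lemma nodup_posList (i0 : Int) (l : List String) (s : String) :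
    (posList i0 l s).Nodup := by
  induction l generalizing i0 with
  | nil => simp [posList]
  | cons a t ih =>
    by_cases h : a = s
    · simp only [posList, h, if_true, List.nodup_cons]
      refine ⟨fun hmem => ?_, ih (i0 + 1)⟩
      rw [mem_posList] at hmem
      obtain ⟨m, _, heq, _⟩ := hmem
      omega
    · simp only [posList, h, if_false]; exact ih (i0 + 1)

lemma idxOf_posList (l : List String) (s : String) (i0 : Int) (j : Nat)
    (hj : j < l.length) (hs : l[j] = s) :
    (posList i0 l s).idxOf (i0 + j) = (l.take j).count s := by
  induction l generalizing i0 j with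
  | nil => simp at hj
  | cons a t ih =>
    cases j with
    | zero =>
      simp only [List.getElem_cons_zero] at hs
      simp [posList, hs, List.idxOf_cons_self]
    | succ j =>
      simp only [List.getElem_cons_succ] at hs
      by_cases h : a = s
      · have hne : i0 ≠ i0 + (j + 1 : Nat) := by push_cast; omega
        simp only [posList, h, if_true, List.take_succ_cons, List.count_cons]
        rw [List.idxOf_cons_ne _ (by exact_mod_cast hne)]
        have := ih (i0 + 1) j (by simpa using hj) hs
        have harith : i0 + ((j : Int) + 1) = (i0 + 1) + j := by ring
        push_cast
        rw [harith, this]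
        simp
      · simp only [posList, h, if_false, List.take_succ_cons, List.count_cons]
        have := ih (i0 + 1) j (by simpa using hj) hs
        have harith : i0 + ((j + 1 : Nat) : Int) = (i0 + 1) + j := by push_cast; ring
        rw [harith, this]
        simp [h]

-- find? over an enumerated list picks the first occurrence, paired with its index
lemma find?_enumerate (xs : List Int) (a j : Int) (hmem : j ∈ xs) :
    (PySem.List.enumerate xs a).find? (fun p => p.2 == j)
      = some (a + (xs.idxOf j : Int), j) := by
  induction xs generalizing a with
  | nil => simp at hmem
  | cons x t ih =>
    rw [PySem.List.enumerate_cons]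
    by_cases h : x = j
    · subst h; simp [List.idxOf_cons_self]
    · have hmem' : j ∈ t := by cases hmem with
        | head => exact absurd rfl h
        | tail _ h' => exact h'
      rw [List.find?_cons_of_neg (by simp [h]), ih (a + 1) hmem',
          List.idxOf_cons_ne _ (by simpa using h)]
      congr 1
      push_cast
      ring

lemma find?_enumerate_none (xs : List Int) (a j : Int) (hmem : j ∉ xs) :
    (PySem.List.enumerate xs a).find? (fun p => p.2 == j) = none := by
  rw [List.find?_eq_none]
  intro p hp h
  have hx : p.2 ∈ xs := by
    have hm := PySem.List.map_snd_enumerate xs a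
    exact hm ▸ List.mem_map_of_mem hp
  have : p.2 = j := by simpa using h
  exact hmem (this ▸ hx)

-- scatter lemma: folding point-assignments with pairwise-distinct target indices
lemma foldl_pySetD_getElem? (as : List (Int × Int)) (r : List Int) (j : Nat)
    (hnd : (as.map (·.2)).Nodup)
    (hrange : ∀ q ∈ as, 0 ≤ q.2 ∧ q.2 < (r.length : Int)) :
    (as.foldl (fun r q => PySem.List.pySetD r q.2 q.1) r)[j]? =
      match as.find? (fun q => q.2 == (j : Int)) with
      | some q => if j < r.length then some q.1 else none
      | none => r[j]? := by
  induction as generalizing r with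
  | nil => simp
  | cons a t ih =>
    have ha := hrange a (by simp)
    have hset : PySem.List.pySetD r a.2 a.1 = r.set a.2.toNat a.1 :=
      PySem.List.pySetD_of_nonneg r a.1 ha.1
    have hlen : (r.set a.2.toNat a.1).length = r.length := by simp
    have hnd' : (t.map (·.2)).Nodup := (List.nodup_cons.mp hnd).2
    have hrange' : ∀ q ∈ t, 0 ≤ q.2 ∧ q.2 < ((r.set a.2.toNat a.1).length : Int) := by
      intro q hq; rw [hlen]; exact hrange q (List.mem_cons_of_mem _ hq)
    rw [List.foldl_cons, hset, ih _ hnd' hrange', hlen]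
    by_cases h : a.2 = (j : Int)
    · have hjr : j < r.length := by
        have := ha.2; rw [h] at this; exact_mod_cast this
      have hfind : t.find? (fun q => q.2 == (j : Int)) = none := by
        rw [List.find?_eq_none]
        intro q hq
        have : a.2 ∉ t.map (·.2) := (List.nodup_cons.mp hnd).1
        simp only [beq_iff_eq]
        intro hc
        exact this (h ▸ hc ▸ List.mem_map_of_mem hq)
      rw [hfind, List.find?_cons_of_pos (by simp [h])]
      have : a.2.toNat = j := by omega
      simp [this, hjr]
    · rw [List.find?_cons_of_neg (by simp [h])]
      cases hfind : t.find? (fun q => q.2 == (j : Int)) with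
      | some q => simp
      | none =>
        simp only
        rw [List.getElem?_set_ne]
        omega

-- only the block of the matching character can satisfy the find? predicate
lemma find?_flatMap_single {α β : Type} (K : List α) (g : α → List β) (p : β → Bool)
    (s0 : α) (hs0 : s0 ∈ K)
    (hnone : ∀ s ∈ K, s ≠ s0 → (g s).find? p = none) :
    (K.flatMap g).find? p = (g s0).find? p := by
  induction K with
  | nil => simp at hs0
  | cons a t ih =>
    rw [List.flatMap_cons, List.find?_append]
    by_cases h : a = s0
    · subst h
      cases hfind : (g a).find? p with
      | some q => simp
      | none =>
        rw [Option.none_or, List.find?_eq_none]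
        intro b hb
        obtain ⟨s, hsmem, hbmem⟩ := List.mem_flatMap.mp hb
        by_cases hss : s = a
        · subst hss
          exact List.find?_eq_none.mp hfind b hbmem
        · exact List.find?_eq_none.mp (hnone s (List.mem_cons_of_mem _ hsmem) hss) b hbmem
    · have hs0' : s0 ∈ t := by cases hs0 with
        | head => exact absurd rfl h
        | tail _ h' => exact h'
      rw [hnone a (by simp) h, Option.none_or]
      exact ih hs0' (fun s hs => hnone s (List.mem_cons_of_mem _ hs))

lemma B_positions (bw : String) :
    ((PySem.List.enumerate bw.toList).foldl
      (fun (d : PySem.Dict String (List Int)) p =>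
        d.modify (String.ofList [p.2]) [] (· ++ [p.1])) PySem.Dict.empty).items
    = (PySem.Set.ofList (bw.toList.map (fun c => String.ofList [c]))).map
        (fun s => (s, posList 0 (bw.toList.map (fun c => String.ofList [c])) s)) := by
  set ks := bw.toList.map (fun c => String.ofList [c]) with hks
  set D := (PySem.List.enumerate bw.toList).foldl
      (fun (d : PySem.Dict String (List Int)) p =>
        d.modify (String.ofList [p.2]) [] (· ++ [p.1])) PySem.Dict.empty with hD
  have hmapkey : (PySem.List.enumerate bw.toList).map (fun p => String.ofList [p.2]) = ks := by
    rw [hks]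
    conv_rhs => rw [← PySem.List.map_snd_enumerate bw.toList 0]
    rw [List.map_map]
    rfl
  have hkeys : D.keys = PySem.Set.ofList ks := by
    rw [hD, PySem.Dict.keys_foldl_modify_key (PySem.List.enumerate bw.toList)
          (fun p => String.ofList [p.2]) ([] : List Int)
          (fun _ p => (· ++ [p.1])) PySem.Dict.empty,
        hmapkey, PySem.Dict.keys_empty, PySem.Set.update_nil_left]
  have hnd : D.keys.Nodup := by rw [hkeys]; exact PySem.Set.nodup_ofList ks
  have hgetD : ∀ s, D.getD s [] = posList 0 ks s := by
    intro s
    have hswap : D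
        = (((PySem.List.enumerate bw.toList).map (fun p => (String.ofList [p.2], p.1))).foldl
            (fun (d : PySem.Dict String (List Int)) q => d.modify q.1 [] (· ++ [q.2]))
            PySem.Dict.empty) := by
      rw [hD]
      exact (@List.foldl_map (Int × Char) (String × Int) (PySem.Dict String (List Int))
        (fun p => (String.ofList [p.2], p.1))
        (fun d q => d.modify q.1 [] (· ++ [q.2]))
        (PySem.List.enumerate bw.toList) PySem.Dict.empty).symm
    rw [hswap, PySem.Dict.getD_foldl_modify_append, PySem.Dict.getD_empty, List.nil_append]
    exact posList_eq_filter bw.toList 0 s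
  rw [PySem.Dict.items_eq_map_keys D hnd ([] : List Int), hkeys]
  exact List.map_congr_left (fun s _ => by rw [hgetD s])

lemma tots_B_eq (bw : String) :
    (((PySem.Set.ofList (bw.toList.map (fun c => String.ofList [c]))).map
        (fun s => (s, posList 0 (bw.toList.map (fun c => String.ofList [c])) s))).foldl
      (fun (t : PySem.Dict String Int) ci => t.insert ci.1 (PySem.List.len ci.2))
      PySem.Dict.empty).items
    = (PySem.Dict.counter (bw.toList.map (fun c => String.ofList [c]))).items := by
  set ks := bw.toList.map (fun c => String.ofList [c]) with hks
  set items := (PySem.Set.ofList ks).map (fun s => (s, posList 0 ks s)) with hitems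
  refine (PySem.Dict.items_foldl_insert_fresh items (fun ci => ci.1)
      (fun ci => PySem.List.len ci.2) PySem.Dict.empty
      (fun a _ => PySem.Dict.contains_empty _) ?_).trans ?_
  · rw [hitems, List.map_map,
        show ((fun (ci : String × List Int) => ci.1) ∘ (fun s => (s, posList 0 ks s))) = id from rfl,
        List.map_id]
    exact PySem.Set.nodup_ofList ks
  · have hemp : (PySem.Dict.empty : PySem.Dict String Int).items = [] := rfl
    rw [hemp, List.nil_append, PySem.Dict.items_counter, hitems, List.map_map]
    refine List.map_congr_left (fun s _ => ?_)
    simp [Function.comp, PySem.List.len_eq, length_posList]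

lemma rank_bwt_alt_eq (bw : String) :
    rank_bwt_alt bw
      = ((((PySem.Set.ofList (bw.toList.map (fun c => String.ofList [c]))).map
            (fun s => (s, posList 0 (bw.toList.map (fun c => String.ofList [c])) s))).foldl
          (fun r ci => (PySem.List.enumerate ci.2).foldl
            (fun r q => PySem.List.pySetD r q.2 q.1) r)
          (List.replicate bw.toList.length (0 : Int))),
         (PySem.Dict.counter (bw.toList.map (fun c => String.ofList [c]))).items) := by
  have hP : rank_bwt_alt bw
      = ((((PySem.List.enumerate bw.toList).foldl
            (fun (d : PySem.Dict String (List Int)) p =>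
              d.modify (String.ofList [p.2]) [] (· ++ [p.1])) PySem.Dict.empty).items.foldl
          (fun (st : PySem.Dict String Int × List Int) ci =>
            (st.1.insert ci.1 (PySem.List.len ci.2),
             (PySem.List.enumerate ci.2).foldl (fun r q => PySem.List.pySetD r q.2 q.1) st.2))
          (PySem.Dict.empty, List.replicate bw.toList.length (0 : Int))).2,
         (((PySem.List.enumerate bw.toList).foldl
            (fun (d : PySem.Dict String (List Int)) p =>
              d.modify (String.ofList [p.2]) [] (· ++ [p.1])) PySem.Dict.empty).items.foldl
          (fun (st : PySem.Dict String Int × List Int) ci =>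
            (st.1.insert ci.1 (PySem.List.len ci.2),
             (PySem.List.enumerate ci.2).foldl (fun r q => PySem.List.pySetD r q.2 q.1) st.2))
          (PySem.Dict.empty, List.replicate bw.toList.length (0 : Int))).1.items) := rfl
  rw [hP, B_positions bw]
  have hsplit := PySem.List.foldl_prod_mk
      (fun (t : PySem.Dict String Int) ci => t.insert ci.1 (PySem.List.len ci.2))
      (fun r (ci : String × List Int) => (PySem.List.enumerate ci.2).foldl
        (fun r q => PySem.List.pySetD r q.2 q.1) r)
      ((PySem.Set.ofList (bw.toList.map (fun c => String.ofList [c]))).map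
        (fun s => (s, posList 0 (bw.toList.map (fun c => String.ofList [c])) s)))
      PySem.Dict.empty (List.replicate bw.toList.length (0 : Int))
  rw [hsplit]
  rw [tots_B_eq bw]

-- the ranks computed by B's scatter pass coincide with A's running counts
lemma ranks_eq (bw : String) :
    (((PySem.Set.ofList (bw.toList.map (fun c => String.ofList [c]))).map
        (fun s => (s, posList 0 (bw.toList.map (fun c => String.ofList [c])) s))).foldl
      (fun r ci => (PySem.List.enumerate ci.2).foldl
        (fun r q => PySem.List.pySetD r q.2 q.1) r)
      (List.replicate bw.toList.length (0 : Int)))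
    = specR [] (bw.toList.map (fun c => String.ofList [c])) := by
  set ks := bw.toList.map (fun c => String.ofList [c]) with hks
  set n := bw.toList.length with hn
  have hkslen : ks.length = n := by rw [hks, List.length_map]
  set K := PySem.Set.ofList ks with hK
  have h1 : (K.map (fun s => (s, posList 0 ks s))).foldl
        (fun r ci => (PySem.List.enumerate ci.2).foldl
          (fun r q => PySem.List.pySetD r q.2 q.1) r)
        (List.replicate n (0 : Int))
      = K.foldl (fun r s => (PySem.List.enumerate (posList 0 ks s)).foldl
          (fun r q => PySem.List.pySetD r q.2 q.1) r) (List.replicate n (0 : Int)) :=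
    @List.foldl_map String (String × List Int) (List Int) (fun s => (s, posList 0 ks s))
      (fun r ci => (PySem.List.enumerate ci.2).foldl
        (fun r q => PySem.List.pySetD r q.2 q.1) r) K (List.replicate n (0 : Int))
  have h2 : (K.flatMap (fun s => PySem.List.enumerate (posList 0 ks s))).foldl
        (fun r q => PySem.List.pySetD r q.2 q.1) (List.replicate n (0 : Int))
      = K.foldl (fun r s => (PySem.List.enumerate (posList 0 ks s)).foldl
          (fun r q => PySem.List.pySetD r q.2 q.1) r) (List.replicate n (0 : Int)) :=
    @List.foldl_flatMap String (Int × Int) (List Int)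
      (fun s => PySem.List.enumerate (posList 0 ks s))
      (fun r q => PySem.List.pySetD r q.2 q.1) K (List.replicate n (0 : Int))
  set as := K.flatMap (fun s => PySem.List.enumerate (posList 0 ks s)) with has
  have hmem_pos : ∀ s (x : Int), x ∈ posList 0 ks s →
      ∃ m : Nat, ∃ _ : m < n, x = (m : Int) ∧ ks[m] = s := by
    intro s x hx
    rw [mem_posList] at hx
    obtain ⟨m, hm, hxm, hsm⟩ := hx
    exact ⟨m, by omega, by omega, hsm⟩
  have hnd : (as.map (·.2)).Nodup := by
    rw [has, List.map_flatMap, List.nodup_flatMap]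
    constructor
    · intro s _
      rw [PySem.List.map_snd_enumerate]
      exact nodup_posList 0 ks s
    · refine List.Pairwise.imp_of_mem ?_
        ((PySem.Set.nodup_ofList ks : K.Nodup) : K.Pairwise (· ≠ ·))
      intro a b _ _ hne
      simp only [Function.onFun]
      rw [PySem.List.map_snd_enumerate, PySem.List.map_snd_enumerate]
      intro x hxa hxb
      obtain ⟨m1, _, h1', hs1⟩ := hmem_pos a x hxa
      obtain ⟨m2, _, h2', hs2⟩ := hmem_pos b x hxb
      have hm12 : m1 = m2 := by omega
      exact hne (hs1 ▸ hm12 ▸ hs2)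
  have hrange : ∀ q ∈ as, 0 ≤ q.2 ∧ q.2 < ((List.replicate n (0 : Int)).length : Int) := by
    intro q hq
    rw [has, List.mem_flatMap] at hq
    obtain ⟨s, _, hqmem⟩ := hq
    have hq2 : q.2 ∈ posList 0 ks s := by
      have hm := PySem.List.map_snd_enumerate (posList 0 ks s) 0
      exact hm ▸ List.mem_map_of_mem hqmem
    obtain ⟨m, hm, hq2', _⟩ := hmem_pos s q.2 hq2
    rw [List.length_replicate]
    omega
  rw [h1, ← h2]
  apply List.ext_getElem?
  intro j
  by_cases hj : j < n
  · set s0 := ks[j]'(by omega) with hs0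
    have hjmem : (j : Int) ∈ posList 0 ks s0 := by
      rw [mem_posList]
      exact ⟨j, by omega, by simp, rfl⟩
    have hfind : as.find? (fun q => q.2 == (j : Int))
        = some ((0 : Int) + ((posList 0 ks s0).idxOf (j : Int) : Int), (j : Int)) := by
      rw [has, find?_flatMap_single K _ _ s0
            (by rw [hK]; exact (PySem.Set.mem_ofList _ _).mpr (hs0 ▸ List.getElem_mem _))]
      · exact find?_enumerate _ 0 _ hjmem
      · intro s _ hne
        apply find?_enumerate_none
        intro hmem'
        obtain ⟨m, _, hm', hsm⟩ := hmem_pos s (j : Int) hmem'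
        have hmj : m = j := by omega
        subst hmj
        exact hne hsm.symm
    rw [foldl_pySetD_getElem? as (List.replicate n (0 : Int)) j hnd hrange, hfind]
    have hidx := idxOf_posList ks s0 0 j (by omega) rfl
    simp only [zero_add] at hidx
    rw [getElem?_specR [] ks j (by omega)]
    simp only [List.length_replicate, hj, if_true, List.nil_append]
    rw [hidx, hs0]
    norm_num
  · rw [foldl_pySetD_getElem? as (List.replicate n (0 : Int)) j hnd hrange]
    have h1' : (List.replicate n (0 : Int))[j]? = none :=
      List.getElem?_eq_none (by simpa using (by omega : n ≤ j))
    have h2' : (specR [] ks)[j]? = none :=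
      List.getElem?_eq_none (by rw [length_specR]; omega)
    cases hfind : as.find? (fun q => q.2 == (j : Int)) with
    | none => rw [h1', h2']
    | some q => simp only [List.length_replicate, hj, if_false]; rw [h2']

-- ===== VERDICT (by name: the statement is the Claim_ definition above) =====
theorem rank_bwt_spec : Claim_equal_rank_bwt := by
  intro bw _
  unfold Spec_rank_bwt
  rw [rank_bwt_eq bw, rank_bwt_alt_eq bw, ranks_eq bw]
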